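-- pv_equiv track=rewrite | github.com/JorgeMG117/AdventOfCode | 2023/Day14/main.py | load_north_support_beams
-- ===== SOURCE A (Python) =====
-- ROUNDED_ROCK = 'O'
--
-- EMPTY = '.'
--
-- def load_north_support_beams(platform):
--     load = 0
--     # Read column by column
--     for col in range(len(platform[0])):
--         empty_spaces = []
--         for row in range(len(platform)):
--             val = platform[row][col]
--
--             if val == ROUNDED_ROCK:
--                 row_value = row
--                 if len(empty_spaces) > 0:
--                     row_value = empty_spaces.pop(0)
--                     empty_spaces.append(row)
--
--                 load += len(platform) - row_value
--             elif val == EMPTY: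
--                 empty_spaces.append(row)
--             else:#CUBE_ROCK
--                 empty_spaces = []
--     return load
-- ===== SOURCE B (Python) =====
-- def load_north_support_beams(platform):
--     n = len(platform)
--     total = 0
--     # transpose into columns, then score each '#'-delimited segment in closed form
--     for col in zip(*platform):
--         seg, count = 0, 0
--         for i, ch in enumerate(col):
--             if ch == 'O':
--                 count += 1
--             elif ch != '.':
--                 total += count * (n - seg) - count * (count - 1) // 2
--                 seg, count = i + 1, 0
--         total += count * (n - seg) - count * (count - 1) // 2
--     return total
-- ===== Notes on version B (the rewrite author's own statement) =====
-- stated objective: alternative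
-- what changed: B transposes the grid into columns and scores each '#'-delimited segment with a closed-form arithmetic sum (count*(n-seg) - count*(count-1)//2) instead of A's per-cell queue of empty rows with pop(0)/append
import Mathlib
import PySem

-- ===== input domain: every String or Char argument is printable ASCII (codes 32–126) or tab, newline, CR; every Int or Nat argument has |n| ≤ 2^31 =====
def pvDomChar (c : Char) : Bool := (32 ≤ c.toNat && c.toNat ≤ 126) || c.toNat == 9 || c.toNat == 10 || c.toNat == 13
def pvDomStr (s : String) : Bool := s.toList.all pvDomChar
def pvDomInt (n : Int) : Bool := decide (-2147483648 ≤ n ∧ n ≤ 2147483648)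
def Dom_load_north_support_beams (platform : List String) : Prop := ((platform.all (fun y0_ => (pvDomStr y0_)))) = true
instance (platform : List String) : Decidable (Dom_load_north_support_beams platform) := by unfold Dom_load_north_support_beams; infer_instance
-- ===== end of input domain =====

-- B transposes the grid into columns and scores each '#'-delimited segment with a
-- closed-form sum, replacing A's per-cell queue of empty rows (pop(0)/append).


-- ===== PORT A =====
-- platform[row][col]; in range under Pre_ (Python raises out of range, excluded there)
def pvCharAt (platform : List String) (row col : Int) : Char :=
  (PySem.Str.pyGet? (PySem.List.pyGetD platform row "") col).getD ' '

-- one inner-loop step of A: state = (load, empty_spaces)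
def pvAStep (platform : List String) (col : Int) (st : Int × List Int) (row : Int) :
    Int × List Int :=
  let val := pvCharAt platform row col
  if val = 'O' then
    if st.2.length > 0 then
      (st.1 + ((platform.length : Int) - st.2.headD 0), st.2.tail ++ [row])
    else
      (st.1 + ((platform.length : Int) - row), st.2)
  else if val = '.' then
    (st.1, st.2 ++ [row])
  else
    (st.1, [])

def load_north_support_beams (platform : List String) : Int :=
  (PySem.List.pyRange 0 (PySem.Str.len (PySem.List.pyGetD platform 0 "")) 1).foldl
    (fun load col =>
      ((PySem.List.pyRange 0 (platform.length : Int) 1).foldl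
        (pvAStep platform col) (load, [])).1)
    0

-- ===== PORT B =====
-- zip(*platform): columns of the grid, truncated to the shortest row (as Python zip does)
def pvCols (platform : List String) : List (List Char) :=
  let rows := platform.map String.toList
  let m := (rows.map List.length).foldl min (rows.headD []).length
  (List.range m).map (fun j => rows.map (fun r => r.getD j ' '))

-- count*(n - seg) - count*(count-1)//2 : closed-form load of one segment
def pvContrib (n seg count : Int) : Int :=
  count * (n - seg) - PySem.Int.floordiv (count * (count - 1)) 2

-- one inner-loop step of B: state = (total, seg, count), p = (i, ch) from enumerate
def pvBStep (n : Int) (st : Int × Int × Int) (p : Int × Char) : Int × Int × Int :=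
  if p.2 = 'O' then (st.1, st.2.1, st.2.2 + 1)
  else if p.2 ≠ '.' then (st.1 + pvContrib n st.2.1 st.2.2, p.1 + 1, 0)
  else st

def load_north_support_beams_alt (platform : List String) : Int :=
  let n : Int := platform.length
  (pvCols platform).foldl
    (fun total col =>
      let st := (PySem.List.enumerate col 0).foldl (pvBStep n) (total, 0, 0)
      st.1 + pvContrib n st.2.1 st.2.2)
    0

-- ===== PRECONDITION & SPEC =====
-- Pre_ excludes exactly the inputs where Python A raises IndexError: the empty platform
-- (platform[0]) and platforms with a row shorter than the first row (platform[row][col]).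
def Pre_load_north_support_beams (platform : List String) : Prop :=
  platform ≠ [] ∧ ∀ s ∈ platform, (platform.headD "").length ≤ s.length
instance (platform : List String) : Decidable (Pre_load_north_support_beams platform) := by
  unfold Pre_load_north_support_beams; infer_instance

def pvWitness_load_north_support_beams : List String := ["O.#", ".O.", "#OO"]

def Spec_load_north_support_beams (platform : List String) (out : Int) : Prop := out = load_north_support_beams_alt platform
instance (platform : List String) (out : Int) : Decidable (Spec_load_north_support_beams platform out) := by unfold Spec_load_north_support_beams; infer_instance

-- ===== CLAIM (what is proved, stated in full; the proofs are below) =====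
def Claim_equal_load_north_support_beams : Prop := ∀ (platform : List String), Dom_load_north_support_beams platform → Pre_load_north_support_beams platform → Spec_load_north_support_beams platform (load_north_support_beams platform)

-- ===== LEMMAS AND PROOFS =====

-- [a, a+1, …, a+k-1]: the exact contents of A's queue of empty rows
def pvMyRange : Int → Nat → List Int
  | _, 0 => []
  | a, k + 1 => a :: pvMyRange (a + 1) k

lemma pvMyRange_snoc : ∀ (k : Nat) (a : Int), pvMyRange a k ++ [a + k] = pvMyRange a (k + 1) := by
  intro k
  induction k with
  | zero => intro a; simp [pvMyRange]
  | succ k ih =>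
    intro a
    show a :: (pvMyRange (a + 1) k ++ [a + (k + 1 : Nat)]) = a :: pvMyRange (a + 1) (k + 1)
    rw [show (a + (k + 1 : Nat) : Int) = (a + 1) + k by push_cast; ring]
    rw [ih]

lemma pvContrib_zero (n seg : Int) : pvContrib n seg 0 = 0 := by
  simp [pvContrib, PySem.Int.floordiv]

lemma pvContrib_succ (n seg c : Int) :
    pvContrib n seg (c + 1) = pvContrib n seg c + (n - seg - c) := by
  have he : Even (c * (c - 1)) := by
    have h := Int.even_mul_succ_self (c - 1)
    have hq : (c - 1) * (c - 1 + 1) = c * (c - 1) := by ring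
    rwa [hq] at h
  obtain ⟨t, ht⟩ := he
  have h1 : PySem.Int.floordiv (c * (c - 1)) 2 = t := by
    rw [PySem.Int.floordiv_eq_ediv_of_pos (by omega)]; omega
  have h2 : PySem.Int.floordiv ((c + 1) * (c + 1 - 1)) 2 = t + c := by
    rw [PySem.Int.floordiv_eq_ediv_of_pos (by omega)]
    have : (c + 1) * (c + 1 - 1) = (t + c) * 2 := by nlinarith [ht]
    rw [this]; omega
  unfold pvContrib
  rw [h1, h2]; ring

-- invariant: A's queue is pvMyRange (seg+count) k with seg+count+k = current row, and
-- A's load equals B's total plus the closed-form contribution of the open segment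
lemma pvInner (platform : List String) (j : Int) :
    ∀ (cs : List Char) (r seg count total load : Int) (k : Nat),
      seg + count + (k : Int) = r →
      (∀ i : Nat, i < cs.length → pvCharAt platform (r + (i : Int)) j = cs.getD i ' ') →
      load = total + pvContrib (platform.length : Int) seg count →
      ((PySem.List.pyRange r (r + (cs.length : Int)) 1).foldl (pvAStep platform j)
          (load, pvMyRange (seg + count) k)).1
        = (let st := (PySem.List.enumerate cs r).foldl (pvBStep (platform.length : Int))
              (total, seg, count)
           st.1 + pvContrib (platform.length : Int) st.2.1 st.2.2) := by
  intro cs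
  induction cs with
  | nil =>
    intro r seg count total load k hinv hch hload
    rw [show r + ((List.length ([] : List Char)) : Int) = r by simp]
    rw [PySem.List.pyRange_one_eq_nil (by omega)]
    simpa [PySem.List.enumerate] using hload
  | cons c cs ih =>
    intro r seg count total load k hinv hch hload
    have hc0 : pvCharAt platform r j = c := by
      have := hch 0 (by simp)
      simpa using this
    rw [show r + ((List.length (c :: cs)) : Int) = (r + 1) + (cs.length : Int) by
      simp; ring]
    rw [PySem.List.pyRange_one_cons (by omega)]
    rw [PySem.List.enumerate_cons]
    simp only [List.foldl_cons]
    have hch' : ∀ i : Nat, i < cs.length →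
        pvCharAt platform ((r + 1) + (i : Int)) j = cs.getD i ' ' := by
      intro i hi
      have := hch (i + 1) (by simpa using Nat.succ_lt_succ hi)
      rw [show r + ((i + 1 : Nat) : Int) = (r + 1) + (i : Int) by push_cast; ring] at this
      simpa using this
    by_cases hO : c = 'O'
    · subst hO
      rw [show pvAStep platform j (load, pvMyRange (seg + count) k) r
            = (load + ((platform.length : Int) - (seg + count)), pvMyRange (seg + count + 1) k) from ?_,
          show pvBStep (platform.length : Int) (total, seg, count) (r, 'O')
            = (total, seg, count + 1) from ?_]
      · have := ih (r + 1) seg (count + 1) total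
          (load + ((platform.length : Int) - (seg + count)))
          k (by omega) hch'
          (by rw [pvContrib_succ]; omega)
        rw [show seg + (count + 1) = seg + count + 1 by ring] at this
        exact this
      · simp [pvBStep]
      · cases k with
        | zero =>
          have hr : r = seg + count := by omega
          subst hr
          simp [pvAStep, hc0, pvMyRange]
        | succ k' =>
          simp only [pvAStep, hc0, pvMyRange, List.headD_cons, List.tail_cons]
          have hr : r = (seg + count + 1) + (k' : Int) := by push_cast at hinv; omega
          rw [hr, pvMyRange_snoc k' (seg + count + 1)]
          rw [if_pos (by simp)]
          simp [pvMyRange]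
    · by_cases hE : c = '.'
      · subst hE
        rw [show pvAStep platform j (load, pvMyRange (seg + count) k) r
              = (load, pvMyRange (seg + count) (k + 1)) from ?_,
            show pvBStep (platform.length : Int) (total, seg, count) (r, '.')
              = (total, seg, count) from ?_]
        · exact ih (r + 1) seg count total load (k + 1) (by push_cast; omega) hch' hload
        · simp [pvBStep]
        · simp only [pvAStep, hc0]
          rw [if_pos trivial]
          have hr : r = (seg + count) + (k : Int) := by omega
          rw [hr, pvMyRange_snoc k (seg + count)]
          rw [if_neg (by decide)]
      · rw [show pvAStep platform j (load, pvMyRange (seg + count) k) r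
              = (load, pvMyRange (r + 1) 0) from ?_,
            show pvBStep (platform.length : Int) (total, seg, count) (r, c)
              = (total + pvContrib (platform.length : Int) seg count, r + 1, 0) from ?_]
        · exact ih (r + 1) (r + 1) 0 (total + pvContrib (platform.length : Int) seg count)
            load 0 (by omega) hch' (by rw [pvContrib_zero]; omega)
        · simp [pvBStep, hO, hE]
        · simp only [pvAStep, hc0]
          rw [if_neg hO, if_neg hE]
          simp [pvMyRange]

lemma pvFoldlMin (a : Nat) : ∀ (l : List Nat), (∀ x ∈ l, a ≤ x) → l.foldl min a = a := by
  intro l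
  induction l with
  | nil => intro _; rfl
  | cons x xs ih =>
    intro h
    simp only [List.foldl_cons, min_eq_left (h x (by simp))]
    exact ih (fun y hy => h y (by simp [hy]))

-- platform[i][k] (via PySem) equals element i of column k of the transposed grid
lemma pvColChar (p : String) (rest : List String) (k i : Nat)
    (hk : k < p.toList.length)
    (hlen : ∀ s ∈ p :: rest, p.length ≤ s.length)
    (hi : i < (p :: rest).length) :
    pvCharAt (p :: rest) (i : Int) (k : Int)
      = (((p :: rest).map String.toList).map (fun r => r.getD k ' ')).getD i ' ' := by
  have hmem : (p :: rest).getD i "" ∈ p :: rest := by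
    rw [List.getD_eq_getElem _ _ hi]; exact List.getElem_mem hi
  have hks : k < ((p :: rest).getD i "").toList.length := by
    have h1 := hlen _ hmem
    rw [String.length_toList] at hk ⊢
    omega
  unfold pvCharAt
  rw [PySem.List.pyGetD_natCast]
  have hstr : PySem.Str.pyGet? ((p :: rest).getD i "") (k : Int)
      = ((p :: rest).getD i "").toList[k]? := by
    simp [PySem.Str.pyGet?, PySem.List.pyGet?_natCast]
  have hks' : k < (p :: rest)[i].toList.length := by
    rw [← List.getD_eq_getElem _ _ hi]; exact hks
  rw [hstr, List.getD_eq_getElem _ _ hi, List.getElem?_eq_getElem hks']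
  rw [List.map_map, List.getD_eq_getElem?_getD, List.getElem?_map,
    List.getElem?_eq_getElem hi]
  simp [List.getElem?_eq_getElem hks']

-- ===== VERDICT (by name: the statement is the Claim_ definition above) =====
theorem load_north_support_beams_spec : Claim_equal_load_north_support_beams := by
  intro platform _ hpre
  obtain ⟨hne, hlen⟩ := hpre
  obtain ⟨p, rest, rfl⟩ : ∃ p rest, platform = p :: rest := by
    cases platform with
    | nil => exact absurd rfl hne
    | cons p rest => exact ⟨p, rest, rfl⟩
  simp only [List.headD_cons] at hlen
  have hm : ((((p :: rest).map String.toList).map List.length).foldl min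
      (((p :: rest).map String.toList).headD []).length) = p.toList.length := by
    simp only [List.map_cons, List.headD_cons]
    refine pvFoldlMin _ _ ?_
    intro x hx
    simp only [List.map_map, List.mem_cons, List.mem_map] at hx
    rcases hx with rfl | ⟨s, hs, rfl⟩
    · exact le_refl _
    · have h2 := hlen s (by simp [hs])
      simpa [Function.comp, String.length_toList] using h2
  have hcols : pvCols (p :: rest)
      = (List.range p.toList.length).map
          (fun j => ((p :: rest).map String.toList).map (fun r => r.getD j ' ')) := by
    unfold pvCols
    simp only [hm]
  have hlen0 : PySem.Str.len (PySem.List.pyGetD (p :: rest) 0 "") = (p.toList.length : Int) := by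
    rw [PySem.List.pyGetD_ofNat']
    simp [PySem.Str.len_eq]
  unfold Spec_load_north_support_beams load_north_support_beams load_north_support_beams_alt
  rw [hlen0, hcols, PySem.List.pyRange_zero_nat p.toList.length, List.foldl_map, List.foldl_map]
  refine PySem.List.foldl_congr_mem _ _ _ _ ?_
  intro load k hkmem
  have hk : k < p.toList.length := List.mem_range.mp hkmem
  have hch : ∀ i : Nat, i < (((p :: rest).map String.toList).map (fun r => r.getD k ' ')).length →
      pvCharAt (p :: rest) ((0 : Int) + (i : Int)) (k : Int)
        = (((p :: rest).map String.toList).map (fun r => r.getD k ' ')).getD i ' ' := by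
    intro i hi
    rw [zero_add]
    exact pvColChar p rest k i hk hlen (by simpa using hi)
  have := pvInner (p :: rest) (k : Int)
    (((p :: rest).map String.toList).map (fun r => r.getD k ' '))
    0 0 0 load load 0 (by omega) hch (by rw [pvContrib_zero]; omega)
  simp only [List.length_map, List.length_cons, zero_add] at this ⊢
  exact this
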